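-- pv_equiv track=rewrite | github.com/BLSHEE22/name-anagram-generator | test_combo.py | exact_total_anagrams
-- ===== SOURCE A (Python) =====
-- import math
-- from collections import Counter
--
-- def leftover_permutations(counter):
--     total = sum(counter.values())
--     numerator = math.factorial(total)
--     denominator = 1
--     for c in counter.values():
--         denominator *= math.factorial(c)
--     return numerator // denominator
--
-- def exact_total_anagrams(name, starting_words):
--     name = name.lower().replace(" ", "")
--     base_counter = Counter(name)
--
--     total = 0
--
--     for word in starting_words:
--         word_counter = Counter(word.lower())
--         leftover = base_counter - word_counter
--         total += leftover_permutations(leftover)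
--
--     return total
-- ===== SOURCE B (Python) =====
-- def exact_total_anagrams(name, starting_words):
--     cleaned = name.lower().replace(" ", "")
--     total = 0
--     for word in starting_words:
--         # delete the word's letters from the name's letter list (first occurrence, skip misses)
--         rem = list(cleaned)
--         for ch in word.lower():
--             if ch in rem:
--                 rem.remove(ch)
--         # count distinct permutations of the leftover letters in ONE pass:
--         # after placing the i-th letter, multiply by i and divide by the running
--         # multiplicity of that letter (the division is always exact)
--         r = 1
--         n = 0
--         seen = {}
--         for ch in rem:
--             n += 1
--             k = seen.get(ch, 0) + 1
--             seen[ch] = k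
--             r = r * n // k
--         total += r
--     return total
-- ===== Notes on version B (the rewrite author's own statement) =====
-- stated objective: alternative
-- what changed: B replaces A's Counter subtraction and factorial-ratio multinomial by removing the word's letters from the name's letter list (first occurrence, misses skipped) and counting distinct permutations of the leftover in a single incremental pass: multiply the accumulator by the position and divide by the running multiplicity of the letter just placed, each division being exact.
import Mathlib
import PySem

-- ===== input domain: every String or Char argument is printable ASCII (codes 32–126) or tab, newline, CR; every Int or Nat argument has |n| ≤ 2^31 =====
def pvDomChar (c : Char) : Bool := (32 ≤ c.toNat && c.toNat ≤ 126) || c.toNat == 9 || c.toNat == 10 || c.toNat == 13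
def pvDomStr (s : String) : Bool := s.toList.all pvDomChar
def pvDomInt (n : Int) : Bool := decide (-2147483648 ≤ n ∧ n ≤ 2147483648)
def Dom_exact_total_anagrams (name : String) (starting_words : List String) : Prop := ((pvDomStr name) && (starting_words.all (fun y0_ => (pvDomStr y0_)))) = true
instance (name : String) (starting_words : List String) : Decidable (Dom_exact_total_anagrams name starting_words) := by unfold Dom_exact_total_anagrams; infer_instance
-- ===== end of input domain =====

-- B replaces A's Counter subtraction and factorial-ratio multinomial by letter-list removal and a
-- single incremental pass that multiplies by the position and divides by the running multiplicity
-- (objective: alternative; same cost class).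

-- ===== PORT A =====
-- math.factorial; exact for 0 ≤ n (Python raises on negative, never reached here)
def pyFact (n : Int) : Int := (n.toNat.factorial : Int)

-- Counter.__sub__: self's items with positive difference kept, then other's items whose key is
-- absent in self and whose negated count is positive
def counterSub (a b : PySem.Dict Char Int) : PySem.Dict Char Int :=
  let d1 := a.items.foldl (fun d p =>
      if 0 < p.2 - b.getD p.1 0 then d.insert p.1 (p.2 - b.getD p.1 0) else d) PySem.Dict.empty
  b.items.foldl (fun d p =>
      if a.contains p.1 = false ∧ p.2 < 0 then d.insert p.1 (0 - p.2) else d) d1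

def leftover_permutations (counter : PySem.Dict Char Int) : Int :=
  let total := counter.values.sum
  let numerator := pyFact total
  let denominator := counter.values.foldl (fun d c => d * pyFact c) 1
  PySem.Int.floordiv numerator denominator

def exact_total_anagrams (name : String) (starting_words : List String) : Int :=
  let name' := PySem.Str.replace (PySem.Str.lower name) " " ""
  let base := PySem.Dict.counter name'.toList
  starting_words.foldl (fun total word =>
    total + leftover_permutations
      (counterSub base (PySem.Dict.counter (PySem.Str.lower word).toList))) 0

-- ===== PORT B =====
-- loop bodies of B's two inner loops, as named helpers
def removeStep (rem : List Char) (ch : Char) : List Char :=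
  if rem.contains ch then (PySem.List.remove? rem ch).getD rem else rem

def permStep (s : Int × Int × PySem.Dict Char Int) (ch : Char) : Int × Int × PySem.Dict Char Int :=
  let n := s.2.1 + 1
  let k := s.2.2.getD ch 0 + 1
  (PySem.Int.floordiv (s.1 * n) k, n, s.2.2.insert ch k)

def exact_total_anagrams_alt (name : String) (starting_words : List String) : Int :=
  let cleaned := PySem.Str.replace (PySem.Str.lower name) " " ""
  starting_words.foldl (fun total word =>
    -- delete the word's letters from the name's letter list (first occurrence, skip misses)
    let rem := (PySem.Str.lower word).toList.foldl removeStep cleaned.toList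
    -- one pass over the leftover letters: r = r * n // k (running multiplicity k in a dict)
    let fin := rem.foldl permStep (1, 0, PySem.Dict.empty)
    total + fin.1) 0

-- ===== PRECONDITION & SPEC =====
def Spec_exact_total_anagrams (name : String) (starting_words : List String) (out : Int) : Prop := out = exact_total_anagrams_alt name starting_words
instance (name : String) (starting_words : List String) (out : Int) : Decidable (Spec_exact_total_anagrams name starting_words out) := by unfold Spec_exact_total_anagrams; infer_instance

-- ===== CLAIM (what is proved, stated in full; the proofs are below) =====
def Claim_equal_exact_total_anagrams : Prop := ∀ (name : String) (starting_words : List String), Dom_exact_total_anagrams name starting_words → Spec_exact_total_anagrams name starting_words (exact_total_anagrams name starting_words)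

-- ===== LEMMAS AND PROOFS =====

lemma sum_toNat (l : List Int) (h : ∀ c ∈ l, 0 ≤ c) :
    l.sum.toNat = (l.map Int.toNat).sum := by
  induction l with
  | nil => simp
  | cons c t ih =>
    have hc : 0 ≤ c := h c (by simp)
    have ht : 0 ≤ t.sum := List.sum_nonneg (fun x hx => h x (by simp [hx]))
    simp only [List.sum_cons, List.map_cons]
    rw [Int.toNat_add hc ht, ih (fun x hx => h x (by simp [hx]))]

-- A's denominator fold is the product of the factorials
lemma foldl_fact_eq_prod (l : List Int) :
    l.foldl (fun d c => d * pyFact c) 1 = (((l.map Int.toNat).map Nat.factorial).prod : Nat) := by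
  induction l using List.reverseRecOn with
  | nil => simp
  | append_singleton t c ih =>
    rw [List.foldl_append, List.foldl_cons, List.foldl_nil, ih]
    simp only [List.map_append, List.map_cons, List.map_nil, List.prod_append, List.prod_cons,
      List.prod_nil, pyFact]
    push_cast; ring

-- Counter.__sub__'s second loop never fires when the other counter's values are nonnegative
lemma foldl_second_loop (ps : List (Char × Int)) (a : PySem.Dict Char Int)
    (d : PySem.Dict Char Int) (h : ∀ p ∈ ps, 0 ≤ p.2) :
    ps.foldl (fun d p => if a.contains p.1 = false ∧ p.2 < 0 then d.insert p.1 (0 - p.2) else d) d = d := by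
  induction ps generalizing d with
  | nil => rfl
  | cons p t ih =>
    have hp : 0 ≤ p.2 := h p (by simp)
    simp only [List.foldl_cons]
    rw [if_neg (by omega)]
    exact ih d (fun q hq => h q (by simp [hq]))

-- the leftover counter's values are the per-letter clamped differences, in letter order
lemma counterSub_values (cs ws : List Char) :
    (counterSub (PySem.Dict.counter cs) (PySem.Dict.counter ws)).values
      = ((PySem.List.dedup cs).map (fun ch => ((cs.count ch : Int) - (ws.count ch : Int)))).filter
          (fun c => decide (0 < c)) := by
  unfold counterSub
  rw [foldl_second_loop _ _ _ (by
    rw [PySem.Dict.items_counter]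
    intro p hp
    obtain ⟨k, _, rfl⟩ := List.mem_map.mp hp
    positivity)]
  rw [show (fun (d : PySem.Dict Char Int) (p : Char × Int) =>
        if 0 < p.2 - (PySem.Dict.counter ws).getD p.1 0 then d.insert p.1 (p.2 - (PySem.Dict.counter ws).getD p.1 0) else d)
      = (fun d p => if (fun (q : Char × Int) => decide (0 < q.2 - (PySem.Dict.counter ws).getD q.1 0)) p = true
          then (fun d (p : Char × Int) => d.insert p.1 (p.2 - (PySem.Dict.counter ws).getD p.1 0)) d p else d) from by
    funext d p; simp]
  rw [← List.foldl_filter]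
  have hfresh : ∀ p ∈ ((PySem.Dict.counter cs).items.filter (fun q : Char × Int => decide (0 < q.2 - (PySem.Dict.counter ws).getD q.1 0))),
      (PySem.Dict.empty : PySem.Dict Char Int).contains p.1 = false := by
    intro p _; rfl
  have hnd : (((PySem.Dict.counter cs).items.filter (fun q : Char × Int => decide (0 < q.2 - (PySem.Dict.counter ws).getD q.1 0))).map (·.1)).Nodup := by
    have h0 := PySem.Dict.nodup_keys_counter (κ := Char) cs
    exact h0.sublist (List.Sublist.map _ List.filter_sublist)
  simp only [PySem.Dict.values]
  rw [PySem.Dict.items_foldl_insert_fresh _ (fun p : Char × Int => p.1)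
    (fun p : Char × Int => p.2 - (PySem.Dict.counter ws).getD p.1 0) _ hfresh hnd]
  rw [PySem.Dict.items_counter, List.filter_map, List.filter_map]
  simp only [Function.comp_def, PySem.Dict.getD_counter]
  have he : (PySem.Dict.empty : PySem.Dict Char Int).items = [] := rfl
  have hd : PySem.List.dedup cs = PySem.Set.ofList cs := rfl
  rw [he, hd]
  simp [List.map_map, Function.comp_def]

-- B's removal step is List.erase (removing an absent element is a no-op)
lemma removeStep_eq_erase (l : List Char) (ch : Char) :
    removeStep l ch = l.erase ch := by
  unfold removeStep
  by_cases h : ch ∈ l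
  · rw [if_pos (by simpa using h), PySem.List.remove?_eq_some_erase l ch h, Option.getD_some]
  · rw [if_neg (by simpa using h), List.erase_of_not_mem h]

-- counts after folding erase over the word's letters: truncated subtraction
lemma erase_fold_count (ws : List Char) : ∀ (l : List Char) (x : Char),
    (ws.foldl (fun l c => l.erase c) l).count x = l.count x - ws.count x := by
  induction ws with
  | nil => intro l x; simp
  | cons c t ih =>
    intro l x
    rw [List.foldl_cons, ih]
    by_cases h : c = x
    · subst h
      have h1 : (l.erase c).count c = l.count c - 1 := by
        simpa using (List.count_erase (a := c) (b := c) (l := l))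
      have h2 : (c :: t).count c = t.count c + 1 := by simp
      omega
    · have h1 : (l.erase c).count x = l.count x := by
        have := List.count_erase (a := x) (b := c) (l := l)
        simpa [h] using this
      have h2 : (c :: t).count x = t.count x := by simp [List.count_cons, h]
      omega

lemma erase_fold_sublist (ws : List Char) : ∀ (l : List Char),
    (ws.foldl (fun l c => l.erase c) l).Sublist l := by
  induction ws with
  | nil => intro l; simp
  | cons c t ih => intro l; exact (ih (l.erase c)).trans List.erase_sublist

lemma sum_count_toFinset (l : List Char) : ∑ x ∈ l.toFinset, l.count x = l.length := by
  simpa using Multiset.toFinset_sum_count_eq (l : Multiset Char)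

-- one snoc step of the incremental multinomial: M(p++[ch]) * (count+1) = M(p) * (len+1)
lemma mult_snoc (p : List Char) (ch : Char) :
    Nat.multinomial (p ++ [ch]).toFinset ((p ++ [ch]).count ·) * (p.count ch + 1)
      = Nat.multinomial p.toFinset (p.count ·) * (p.length + 1) := by
  have hcount : ∀ x, (p ++ [ch]).count x = p.count x + if ch = x then 1 else 0 := by
    intro x; by_cases h : ch = x <;> simp [List.count_append, h]
  have hfin : (p ++ [ch]).toFinset = insert ch p.toFinset := by
    have h1 : ([ch] : List Char).toFinset = {ch} := by simp
    rw [List.toFinset_append, h1, Finset.union_comm, ← Finset.insert_eq]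
  have hP : (0:ℕ) < ∏ x ∈ p.toFinset, (p.count x).factorial :=
    Finset.prod_pos (fun x _ => Nat.factorial_pos _)
  -- the new product of factorials is the old one times (count ch + 1)
  have hprod : ∏ x ∈ (p ++ [ch]).toFinset, ((p ++ [ch]).count x).factorial
      = (∏ x ∈ p.toFinset, (p.count x).factorial) * (p.count ch + 1) := by
    rw [hfin]
    by_cases h : ch ∈ p.toFinset
    · rw [Finset.insert_eq_self.mpr h]
      rw [← Finset.mul_prod_erase p.toFinset (fun x => ((p ++ [ch]).count x).factorial) h,
          ← Finset.mul_prod_erase p.toFinset (fun x => (p.count x).factorial) h]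
      have he : ∏ x ∈ p.toFinset.erase ch, ((p ++ [ch]).count x).factorial
          = ∏ x ∈ p.toFinset.erase ch, (p.count x).factorial := by
        refine Finset.prod_congr rfl (fun x hx => ?_)
        have hne : ch ≠ x := fun hh => (Finset.mem_erase.mp hx).1 hh.symm
        rw [hcount, if_neg hne, Nat.add_zero]
      rw [he, hcount ch, if_pos rfl, Nat.factorial_succ]
      ring
    · rw [Finset.prod_insert h]
      have he : ∏ x ∈ p.toFinset, ((p ++ [ch]).count x).factorial
          = ∏ x ∈ p.toFinset, (p.count x).factorial := by
        refine Finset.prod_congr rfl (fun x hx => ?_)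
        have hne : ch ≠ x := fun hh => h (hh ▸ hx)
        rw [hcount, if_neg hne, Nat.add_zero]
      have hc0 : p.count ch = 0 :=
        List.count_eq_zero.mpr (fun hm => h (List.mem_toFinset.mpr hm))
      rw [he, hcount ch, if_pos rfl, hc0]
      simp [Nat.factorial]
  have hsum : ∑ x ∈ (p ++ [ch]).toFinset, (p ++ [ch]).count x = p.length + 1 := by
    rw [sum_count_toFinset]; simp
  have hsum0 : ∑ x ∈ p.toFinset, p.count x = p.length := sum_count_toFinset p
  have hs1 := Nat.multinomial_spec (p ++ [ch]).toFinset ((p ++ [ch]).count ·)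
  have hs0 := Nat.multinomial_spec p.toFinset (p.count ·)
  rw [hsum, hprod] at hs1
  rw [hsum0] at hs0
  refine Nat.eq_of_mul_eq_mul_left hP ?_
  calc (∏ x ∈ p.toFinset, (p.count x).factorial) *
        (Nat.multinomial (p ++ [ch]).toFinset ((p ++ [ch]).count ·) * (p.count ch + 1))
      = (∏ x ∈ p.toFinset, (p.count x).factorial) * (p.count ch + 1) *
        Nat.multinomial (p ++ [ch]).toFinset ((p ++ [ch]).count ·) := by ring
    _ = (p.length + 1).factorial := hs1
    _ = (p.length + 1) * p.length.factorial := Nat.factorial_succ _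
    _ = (p.length + 1) * ((∏ x ∈ p.toFinset, (p.count x).factorial) * Nat.multinomial p.toFinset (p.count ·)) := by rw [hs0]
    _ = _ := by ring

-- invariant of B's one-pass fold: after a processed prefix p the accumulator is the multinomial of p
lemma fold_inv (L : List Char) : ∀ (p : List Char) (d : PySem.Dict Char Int),
    (∀ x, d.getD x 0 = (p.count x : Int)) →
    (L.foldl permStep ((Nat.multinomial p.toFinset (p.count ·) : Int), (p.length : Int), d)).1
    = (Nat.multinomial (p ++ L).toFinset ((p ++ L).count ·) : Int) := by
  induction L with
  | nil => intro p d _; simp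
  | cons ch t ih =>
    intro p d hd
    rw [List.foldl_cons]
    have hk : d.getD ch 0 + 1 = ((p.count ch + 1 : Nat) : Int) := by rw [hd ch]; push_cast; ring
    have hdiv : PySem.Int.floordiv ((Nat.multinomial p.toFinset (p.count ·) : Int) * ((p.length : Int) + 1)) (d.getD ch 0 + 1)
        = (Nat.multinomial (p ++ [ch]).toFinset ((p ++ [ch]).count ·) : Int) := by
      have hnum : (Nat.multinomial p.toFinset (p.count ·) : Int) * ((p.length : Int) + 1)
          = ((Nat.multinomial p.toFinset (p.count ·) * (p.length + 1) : Nat) : Int) := by push_cast; ring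
      rw [hnum, hk, PySem.Int.floordiv_natCast]
      rw [← mult_snoc p ch, Nat.mul_div_cancel _ (by omega)]
    have hstate : permStep ((Nat.multinomial p.toFinset (p.count ·) : Int), (p.length : Int), d) ch
        = ((Nat.multinomial (p ++ [ch]).toFinset ((p ++ [ch]).count ·) : Int),
           ((p ++ [ch]).length : Int), d.insert ch (d.getD ch 0 + 1)) := by
      unfold permStep
      simp only []
      rw [hdiv]
      simp
    rw [hstate, ih (p ++ [ch]) (d.insert ch (d.getD ch 0 + 1)) (by
      intro x
      rw [PySem.Dict.getD_insert]
      by_cases h : x = ch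
      · subst h
        rw [if_pos rfl, hd x]
        simp [List.count_append]
      · rw [if_neg h, hd x]
        have : ch ≠ x := fun hh => h hh.symm
        simp [List.count_append, List.count_singleton, this]),
      List.append_assoc]
    simp

-- filtered positive clamped diffs: the sum over the distinct letters, zeros dropped
lemma filter_map_sum (ks : List Char) (diff : Char → Int) :
    ((((ks.map diff).filter (fun c => decide (0 < c))).map Int.toNat)).sum
      = (ks.map (fun x => (diff x).toNat)).sum := by
  induction ks with
  | nil => simp
  | cons k t ih =>
    simp only [List.map_cons]
    by_cases h : 0 < diff k
    · rw [List.filter_cons_of_pos (by simpa using h)]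
      simp only [List.map_cons, List.sum_cons, ih]
    · rw [List.filter_cons_of_neg (by simpa using h)]
      have h0 : (diff k).toNat = 0 := by omega
      rw [ih]
      simp [List.sum_cons, h0]

lemma filter_map_prod (ks : List Char) (diff : Char → Int) :
    (((((ks.map diff).filter (fun c => decide (0 < c))).map Int.toNat)).map Nat.factorial).prod
      = (ks.map (fun x => ((diff x).toNat).factorial)).prod := by
  induction ks with
  | nil => simp
  | cons k t ih =>
    simp only [List.map_cons]
    by_cases h : 0 < diff k
    · rw [List.filter_cons_of_pos (by simpa using h)]
      simp only [List.map_cons, List.prod_cons, ih]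
    · rw [List.filter_cons_of_neg (by simpa using h)]
      have h0 : (diff k).toNat = 0 := by omega
      rw [ih]
      simp [List.prod_cons, h0, Nat.factorial]

-- dedup's toFinset is the list's toFinset
lemma dedup_toFinset (l : List Char) : (PySem.List.dedup l).toFinset = l.toFinset := by
  apply Finset.ext
  intro x
  simp [List.mem_toFinset, PySem.List.mem_dedup]

-- one word: A's factorial-ratio term over the Counter difference equals B's incremental pass
-- over the letter list after removals
lemma per_word (cs ws : List Char) :
    leftover_permutations (counterSub (PySem.Dict.counter cs) (PySem.Dict.counter ws))
      = ((ws.foldl (fun l c => l.erase c) cs).foldl permStep (1, 0, PySem.Dict.empty)).1 := by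
  set L := ws.foldl (fun l c => l.erase c) cs with hL
  set diff : Char → Int := fun ch => ((cs.count ch : Int) - (ws.count ch : Int)) with hdiff
  have hLcount : ∀ x, L.count x = (diff x).toNat := by
    intro x
    rw [hL, erase_fold_count]
    simp only [hdiff]
    omega
  have hsub : L.toFinset ⊆ cs.toFinset := by
    intro x hx
    exact List.mem_toFinset.mpr ((erase_fold_sublist ws cs).mem (List.mem_toFinset.mp hx))
  -- B's side via the fold invariant, started at the empty prefix
  have hB : ((L.foldl permStep (1, 0, PySem.Dict.empty)).1 : Int)
      = (Nat.multinomial L.toFinset (L.count ·) : Int) := by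
    have h0 : ∀ x, (PySem.Dict.empty : PySem.Dict Char Int).getD x 0 = (([] : List Char).count x : Int) := by
      intro x; rfl
    have := fold_inv L [] PySem.Dict.empty h0
    simpa using this
  rw [hB]
  -- A's side
  simp only [leftover_permutations]
  rw [counterSub_values]
  set vals := ((PySem.List.dedup cs).map diff).filter (fun c => decide (0 < c)) with hvals
  have hpos : ∀ c ∈ vals, 0 ≤ c := by
    intro c hc
    have := (List.mem_filter.mp hc).2
    simp at this; omega
  have hnum : pyFact vals.sum = ((vals.map Int.toNat).sum.factorial : Nat) := by
    simp [pyFact, sum_toNat vals hpos]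
  rw [hnum, foldl_fact_eq_prod, PySem.Int.floordiv_natCast]
  -- identify sum and product with the multinomial's
  have hE1 : (vals.map Int.toNat).sum = ∑ x ∈ L.toFinset, L.count x := by
    rw [hvals, filter_map_sum]
    have h1 : (PySem.List.dedup cs).map (fun x => (diff x).toNat)
        = (PySem.List.dedup cs).map (fun x => L.count x) := by
      exact List.map_congr_left (fun x _ => (hLcount x).symm)
    rw [h1, ← List.sum_toFinset _ (PySem.List.nodup_dedup cs)]
    rw [dedup_toFinset]
    rw [Finset.sum_subset hsub (fun x _ hx => by
      have := List.count_eq_zero.mpr (fun hm => hx (List.mem_toFinset.mpr hm))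
      simpa using this)]
  have hE2 : ((vals.map Int.toNat).map Nat.factorial).prod = ∏ x ∈ L.toFinset, (L.count x).factorial := by
    rw [hvals, filter_map_prod]
    have h1 : (PySem.List.dedup cs).map (fun x => ((diff x).toNat).factorial)
        = (PySem.List.dedup cs).map (fun x => (L.count x).factorial) := by
      exact List.map_congr_left (fun x _ => by rw [hLcount x])
    rw [h1, ← List.prod_toFinset _ (PySem.List.nodup_dedup cs), dedup_toFinset]
    rw [Finset.prod_subset hsub (fun x _ hx => by
      have h0 := List.count_eq_zero.mpr (fun hm => hx (List.mem_toFinset.mpr hm))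
      rw [h0]; rfl)]
  rw [hE1, hE2]
  rfl

-- ===== VERDICT (by name: the statement is the Claim_ definition above) =====
theorem exact_total_anagrams_spec : Claim_equal_exact_total_anagrams := by
  intro name sw _
  unfold Spec_exact_total_anagrams
  simp only [exact_total_anagrams, exact_total_anagrams_alt]
  have hrm : removeStep = (fun (l : List Char) (c : Char) => l.erase c) := by
    funext l c; exact removeStep_eq_erase l c
  rw [hrm]
  have hf : (fun (total : Int) (word : String) => total + leftover_permutations
      (counterSub (PySem.Dict.counter (PySem.Str.replace (PySem.Str.lower name) " " "").toList)
        (PySem.Dict.counter (PySem.Str.lower word).toList)))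
    = (fun (total : Int) (word : String) => total +
        (((PySem.Str.lower word).toList.foldl (fun (l : List Char) (c : Char) => l.erase c)
            (PySem.Str.replace (PySem.Str.lower name) " " "").toList).foldl permStep
          ((1 : Int), (0 : Int), PySem.Dict.empty)).1) := by
    funext total word
    exact congrArg (fun x => total + x) (per_word _ _)
  rw [hf]
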